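-- pv_equiv track=rewrite | github.com/alexandraback/datacollection | solutions_5670465267826688_1/Python/pali6/main.py | do_case
-- ===== SOURCE A (Python) =====
-- table = [
--     ["1", "i", "j", "k"],
--     ["i", "-1", "k", "-j"],
--     ["j", "-k", "-1", "i"],
--     ["k", "j", "-i", "-1"]
-- ]
--
-- def mul(a, b):
--     if a is None: return b
--     if b is None: return a
--     minus = False
--     if (a[0] == "-") != (b[0] == "-"):
--         minus = True
--     a = "1ijk".index(a[-1])
--     b = "1ijk".index(b[-1])
--     result = table[a][b]
--     if result[0] == "-" and minus:
--         return result[-1]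
--     if minus:
--         return "-" + result
--     return result
--
-- def do_case(x, word):
--     x = min(x, x % 4 + 12)
--     word = word * x
--
--     sall = None
--     for i, char in enumerate(word):
--         sall = mul(sall, char)
--     if sall != "-1":
--         return "NO"
--
--     s = None
--     spos = None
--     for i, char in enumerate(word):
--         s = mul(s, char)
--         if s == "i":
--             spos = i
--             break
--     s2 = None
--     spos2 = None
--     for i, char in enumerate(reversed(word)):
--         s2 = mul(char, s2)
--         if s2 == "k":
--             spos2 = len(word) - i - 1
--             break
--
--     if spos is None or spos2 is None:
--         return "NO"
--     if spos2 <= spos: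
--         return "NO"
--     return "YES"
-- ===== SOURCE B (Python) =====
-- table = [
--     ["1", "i", "j", "k"],
--     ["i", "-1", "k", "-j"],
--     ["j", "-k", "-1", "i"],
--     ["k", "j", "-i", "-1"]
-- ]
--
-- def mul(a, b):
--     if a is None: return b
--     if b is None: return a
--     minus = False
--     if (a[0] == "-") != (b[0] == "-"):
--         minus = True
--     a = "1ijk".index(a[-1])
--     b = "1ijk".index(b[-1])
--     result = table[a][b]
--     if result[0] == "-" and minus:
--         return result[-1]
--     if minus:
--         return "-" + result
--     return result
--
-- def do_case(x, word):
--     x = min(x, x % 4 + 12)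
--     w = word * x
--     c = None
--     i_first = None
--     k_last = None
--     for idx, ch in enumerate(w):
--         c = mul(c, ch)
--         if i_first is None and c == "i":
--             i_first = idx
--         if c == "k":
--             k_last = idx
--     if c != "-1":
--         return "NO"
--     if i_first is None or k_last is None:
--         return "NO"
--     return "YES" if k_last + 1 > i_first else "NO"
-- ===== Notes on version B (the rewrite author's own statement) =====
-- stated objective: alternative
-- what changed: B replaces A's three scans of the repeated word (full-product scan, forward break-at-'i' scan, and a reversed break-at-'k' scan) by a single forward pass that keeps the running quaternion product, the first index where it equals 'i' and the last index where it equals 'k', using the identity that (given total product -1) the suffix from position q is 'k' iff the prefix of length q is 'k'.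
import Mathlib
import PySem

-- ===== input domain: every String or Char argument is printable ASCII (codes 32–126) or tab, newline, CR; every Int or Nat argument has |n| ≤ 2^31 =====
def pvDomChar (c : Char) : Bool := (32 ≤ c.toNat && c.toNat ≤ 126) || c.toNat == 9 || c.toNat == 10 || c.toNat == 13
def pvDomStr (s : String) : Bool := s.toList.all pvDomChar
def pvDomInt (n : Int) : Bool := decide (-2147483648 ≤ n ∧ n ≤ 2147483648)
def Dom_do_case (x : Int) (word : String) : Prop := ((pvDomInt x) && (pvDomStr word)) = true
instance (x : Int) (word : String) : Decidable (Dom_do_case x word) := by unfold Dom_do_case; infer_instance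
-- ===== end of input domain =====

-- B replaces A's three scans of the repeated word (full product, forward break-at-"i" scan, reversed
-- break-at-"k" scan) by ONE forward pass keeping the running product, the first index where it is "i"
-- and the last index where it is "k" (objective: single pass / simpler control flow; same asymptotic cost).

-- ===== PORT A =====
-- '"1ijk".index(ch)': exact for ch in "1ijk"; on any other char Python raises ValueError
-- (those inputs are excluded by Pre_do_case); here such a char maps to 3.
def pvIdx4 (c : Char) : Nat :=
  if c = '1' then 0 else if c = 'i' then 1 else if c = 'j' then 2 else 3

def pvTable : List (List String) :=
  [["1", "i", "j", "k"], ["i", "-1", "k", "-j"], ["j", "-k", "-1", "i"], ["k", "j", "-i", "-1"]]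

-- port of 'mul' (a[0], a[-1] read via toList head/last; exact: the arguments are never empty strings)
def pvMul (a b : Option String) : Option String :=
  match a with
  | none => b
  | some a =>
    match b with
    | none => some a
    | some b =>
      let minus : Bool := ((a.toList.head?.getD ' ') = '-') != ((b.toList.head?.getD ' ') = '-')
      let ai := pvIdx4 (a.toList.getLast?.getD ' ')
      let bi := pvIdx4 (b.toList.getLast?.getD ' ')
      let result := (pvTable.getD ai []).getD bi "1"
      if ((result.toList.head?.getD ' ') = '-') ∧ minus then
        some (String.ofList [result.toList.getLast?.getD ' '])
      else if minus then some (String.ofList ('-' :: result.toList))  -- "-" + result (kernel-transparent append)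
      else some result

-- second loop of A (break at s == "i")
def pvFindI : Option String → List Char → Int → Option Int
  | _, [], _ => none
  | s, c :: rest, i =>
    let s' := pvMul s (some (String.ofList [c]))
    if s' = some "i" then some i else pvFindI s' rest (i + 1)

-- third loop of A, over reversed(word) (break at s2 == "k"; returns len - i - 1)
def pvFindK : Option String → List Char → Int → Int → Option Int
  | _, [], _, _ => none
  | s2, c :: rest, i, len =>
    let s2' := pvMul (some (String.ofList [c])) s2
    if s2' = some "k" then some (len - i - 1) else pvFindK s2' rest (i + 1) len

def pvBodyA (w : List Char) : String :=
  let sall := w.foldl (fun s c => pvMul s (some (String.ofList [c]))) none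
  if sall ≠ some "-1" then "NO"
  else
    let spos := pvFindI none w 0
    let spos2 := pvFindK none w.reverse 0 (w.length : Int)
    match spos, spos2 with
    | some p, some q => if q ≤ p then "NO" else "YES"
    | _, _ => "NO"

def do_case (x : Int) (word : String) : String :=
  pvBodyA (PySem.List.pyRepeat word.toList (min x (PySem.Int.mod x 4 + 12)))

-- ===== PORT B =====
-- single pass: running product c, first index with c == "i", last index with c == "k"
def pvScan : Option String → Option Int → Option Int → Int → List Char →
    Option String × Option Int × Option Int
  | c, ifst, klst, _, [] => (c, ifst, klst)
  | c, ifst, klst, idx, ch :: rest =>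
    let c' := pvMul c (some (String.ofList [ch]))
    let ifst' := if ifst = none ∧ c' = some "i" then some idx else ifst
    let klst' := if c' = some "k" then some idx else klst
    pvScan c' ifst' klst' (idx + 1) rest

def pvBodyB (w : List Char) : String :=
  match pvScan none none none 0 w with
  | (c, ifst, klst) =>
    if c ≠ some "-1" then "NO"
    else
      match ifst, klst with
      | some i, some k => if k + 1 > i then "YES" else "NO"
      | _, _ => "NO"

def do_case_alt (x : Int) (word : String) : String :=
  pvBodyB (PySem.List.pyRepeat word.toList (min x (PySem.Int.mod x 4 + 12)))

-- ===== PRECONDITION & SPEC =====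
-- Pre_ excludes exactly the inputs on which A raises ValueError ('"1ijk".index'): a character outside
-- "1ijk" while the repeated word has length ≥ 2 (with length ≤ 1 that character is never indexed).
def Pre_do_case (x : Int) (word : String) : Prop :=
  (min x (PySem.Int.mod x 4 + 12)).toNat * word.toList.length ≤ 1 ∨
  (word.toList.all fun c => c == '1' || c == 'i' || c == 'j' || c == 'k') = true

instance (x : Int) (word : String) : Decidable (Pre_do_case x word) := by
  unfold Pre_do_case; infer_instance

def pvWitness_do_case : Int × String := (2, "jk")

def Spec_do_case (x : Int) (word : String) (out : String) : Prop := out = do_case_alt x word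
instance (x : Int) (word : String) (out : String) : Decidable (Spec_do_case x word out) := by
  unfold Spec_do_case; infer_instance

-- ===== CLAIM (what is proved, stated in full; the proofs are below) =====
def Claim_equal_do_case : Prop := ∀ (x : Int) (word : String),
  Dom_do_case x word → Pre_do_case x word → Spec_do_case x word (do_case x word)

-- ===== LEMMAS AND PROOFS =====

-- the eight quaternion-unit strings, and the product as a plain String operation
def pvS8 : List String := ["1", "-1", "i", "-i", "j", "-j", "k", "-k"]

def pvQmul (a b : String) : String := (pvMul (some a) (some b)).getD "1"

def pvCS (c : Char) : String := String.ofList [c]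

def pvValidChar (c : Char) : Prop := c ∈ (['1', 'i', 'j', 'k'] : List Char)

-- running product, multiplying new characters on the RIGHT (A's forward loops / B's pass)
def pvProdFrom (s : String) (l : List Char) : String := l.foldl (fun a c => pvQmul a (pvCS c)) s

def pvQprod (l : List Char) : String := pvProdFrom "1" l

-- running product multiplying new characters on the LEFT (A's reversed loop: mul(char, s2))
def pvLProd (t : String) (l : List Char) : String := l.foldl (fun t c => pvQmul (pvCS c) t) t

-- spec of A's/B's "first prefix product = i" search
def pvFI (s : String) : List Char → Option Nat
  | [] => none
  | c :: r =>
    let s' := pvQmul s (pvCS c)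
    if s' = "i" then some 0 else (pvFI s' r).map (· + 1)

-- spec of B's "last prefix product = k" component
def pvLK (s : String) : List Char → Option Nat
  | [] => none
  | c :: r =>
    let s' := pvQmul s (pvCS c)
    match pvLK s' r with
    | some j => some (j + 1)
    | none => if s' = "k" then some 0 else none

-- spec of A's reversed "first suffix product = k" search
def pvFK (t : String) : List Char → Option Nat
  | [] => none
  | c :: r =>
    let t' := pvQmul (pvCS c) t
    if t' = "k" then some 0 else (pvFK t' r).map (· + 1)

theorem pvMul_some (a b : String) : pvMul (some a) (some b) = some (pvQmul a b) := by
  simp only [pvQmul, pvMul]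
  split_ifs <;> rfl

theorem pvQmul_mem : ∀ a ∈ pvS8, ∀ b ∈ pvS8, pvQmul a b ∈ pvS8 := by decide

theorem pvQmul_assoc : ∀ a ∈ pvS8, ∀ b ∈ pvS8, ∀ c ∈ pvS8,
    pvQmul (pvQmul a b) c = pvQmul a (pvQmul b c) := by decide

theorem pvQmul_one_mul : ∀ b ∈ pvS8, pvQmul "1" b = b := by decide

theorem pvQmul_mul_one : ∀ a ∈ pvS8, pvQmul a "1" = a := by decide

theorem pvQmul_cancel_k : ∀ a ∈ pvS8, ∀ b ∈ pvS8,
    pvQmul a b = "-1" → (a = "k" ↔ b = "k") := by decide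

def pvValid (l : List Char) : Prop := ∀ c ∈ l, pvValidChar c

theorem pvCS_mem {c : Char} (h : pvValidChar c) : pvCS c ∈ pvS8 := by
  unfold pvValidChar at h
  simp only [List.mem_cons, List.not_mem_nil, or_false] at h
  rcases h with h | h | h | h <;> subst h <;> decide

theorem pvProdFrom_cons (s : String) (c : Char) (l : List Char) :
    pvProdFrom s (c :: l) = pvProdFrom (pvQmul s (pvCS c)) l := by
  simp only [pvProdFrom, List.foldl_cons]

theorem pvProdFrom_mem {l : List Char} (hl : pvValid l) :
    ∀ s ∈ pvS8, pvProdFrom s l ∈ pvS8 := by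
  induction l with
  | nil => intro s hs; exact hs
  | cons c r ih =>
    intro s hs
    have hc : pvValidChar c := hl c (by simp)
    have hr : pvValid r := fun d hd => hl d (by simp [hd])
    rw [pvProdFrom_cons]
    exact ih hr _ (pvQmul_mem s hs _ (pvCS_mem hc))

theorem pvQprod_mem' {l : List Char} (hl : pvValid l) : pvQprod l ∈ pvS8 :=
  pvProdFrom_mem hl "1" (by decide)

theorem pvQprod_cons' {c : Char} (hc : pvValidChar c) (l : List Char) :
    pvQprod (c :: l) = pvProdFrom (pvCS c) l := by
  show pvProdFrom "1" (c :: l) = _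
  rw [pvProdFrom_cons, pvQmul_one_mul _ (pvCS_mem hc)]

theorem pvProdFrom_eq {l : List Char} (hl : pvValid l) :
    ∀ s ∈ pvS8, pvProdFrom s l = pvQmul s (pvQprod l) := by
  induction l with
  | nil =>
    intro s hs
    exact (pvQmul_mul_one s hs).symm
  | cons c r ih =>
    intro s hs
    have hc : pvCS c ∈ pvS8 := pvCS_mem (hl c (by simp))
    have hr : pvValid r := fun d hd => hl d (by simp [hd])
    rw [pvProdFrom_cons, ih hr _ (pvQmul_mem s hs _ hc),
        pvQmul_assoc s hs _ hc _ (pvQprod_mem' hr),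
        ← ih hr _ hc, pvQprod_cons' (hl c (by simp))]

theorem pvQprod_cons {c : Char} {l : List Char} (hl : pvValid (c :: l)) :
    pvQprod (c :: l) = pvQmul (pvCS c) (pvQprod l) := by
  have hc : pvCS c ∈ pvS8 := pvCS_mem (hl c (by simp))
  have hr : pvValid l := fun d hd => hl d (by simp [hd])
  rw [pvQprod_cons' (hl c (by simp))]
  exact pvProdFrom_eq hr _ hc

theorem pvQprod_split {w : List Char} (hw : pvValid w) (q : Nat) :
    pvQprod w = pvQmul (pvQprod (w.take q)) (pvQprod (w.drop q)) := by
  have ht : pvValid (w.take q) := fun d hd => hw d (List.mem_of_mem_take hd)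
  have hd : pvValid (w.drop q) := fun d hd => hw d (List.mem_of_mem_drop hd)
  conv_lhs => rw [← List.take_append_drop q w]
  show pvProdFrom "1" _ = _
  unfold pvProdFrom
  rw [List.foldl_append]
  exact pvProdFrom_eq hd _ (pvQprod_mem' ht)


theorem pvCS_def (c : Char) : pvCS c = String.ofList [c] := rfl

theorem pvFoldA_some (l : List Char) : ∀ s : String,
    l.foldl (fun s c => pvMul s (some (String.ofList [c]))) (some s) = some (pvProdFrom s l) := by
  induction l with
  | nil => intro s; rfl
  | cons c r ih =>
    intro s
    rw [List.foldl_cons, pvMul_some, ih, pvProdFrom_cons, pvCS_def]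

theorem pvFoldA_none {c : Char} (hc : pvValidChar c) (r : List Char) :
    (c :: r).foldl (fun s ch => pvMul s (some (String.ofList [ch]))) none
      = some (pvQprod (c :: r)) := by
  rw [List.foldl_cons]
  have h0 : pvMul none (some (String.ofList [c])) = some (pvCS c) := rfl
  rw [h0, pvFoldA_some, pvQprod_cons' hc]

theorem pvFI_cons (s : String) (c : Char) (r : List Char) :
    pvFI s (c :: r) = (if pvQmul s (pvCS c) = "i" then some 0
      else (pvFI (pvQmul s (pvCS c)) r).map (· + 1)) := rfl

theorem pvLK_cons (s : String) (c : Char) (r : List Char) :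
    pvLK s (c :: r) = (match pvLK (pvQmul s (pvCS c)) r with
      | some j => some (j + 1)
      | none => if pvQmul s (pvCS c) = "k" then some 0 else none) := rfl

theorem pvFK_cons (t : String) (c : Char) (r : List Char) :
    pvFK t (c :: r) = (if pvQmul (pvCS c) t = "k" then some 0
      else (pvFK (pvQmul (pvCS c) t) r).map (· + 1)) := rfl

theorem pvFindI_spec (l : List Char) : ∀ (s : String) (i : Int),
    pvFindI (some s) l i = (pvFI s l).map (fun j => i + (j : Int)) := by
  induction l with
  | nil => intro s i; rfl
  | cons c r ih =>
    intro s i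
    simp only [pvFindI, pvMul_some, pvFI_cons, ← pvCS_def]
    by_cases h : pvQmul s (pvCS c) = "i"
    · rw [if_pos (by rw [h]), if_pos h]
      simp
    · rw [if_neg (by simp [h]), if_neg h, ih]
      cases pvFI (pvQmul s (pvCS c)) r with
      | none => rfl
      | some j => simp; omega

theorem pvFindK_spec (l : List Char) : ∀ (t : String) (i len : Int),
    pvFindK (some t) l i len = (pvFK t l).map (fun j => len - (i + (j : Int)) - 1) := by
  induction l with
  | nil => intro t i len; rfl
  | cons c r ih =>
    intro t i len
    simp only [pvFindK, pvMul_some, pvFK_cons, ← pvCS_def]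
    by_cases h : pvQmul (pvCS c) t = "k"
    · rw [if_pos (by rw [h]), if_pos h]
      simp
    · rw [if_neg (by simp [h]), if_neg h, ih]
      cases pvFK (pvQmul (pvCS c) t) r with
      | none => rfl
      | some j => simp; omega

theorem pvScan_fst (l : List Char) : ∀ (c : Option String) (f k : Option Int) (i : Int),
    (pvScan c f k i l).1 = l.foldl (fun s ch => pvMul s (some (String.ofList [ch]))) c := by
  induction l with
  | nil => intro c f k i; rfl
  | cons ch r ih =>
    intro c f k i
    simp only [pvScan]
    rw [ih, List.foldl_cons]

theorem pvScan_snd (l : List Char) : ∀ (s : String) (f k : Option Int) (i : Int),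
    (pvScan (some s) f k i l).2.1 =
      (match f with
       | some j => some j
       | none => (pvFI s l).map (fun j => i + (j : Int))) := by
  induction l with
  | nil => intro s f k i; cases f <;> rfl
  | cons c r ih =>
    intro s f k i
    simp only [pvScan, pvMul_some, ← pvCS_def]
    cases f with
    | some j =>
      rw [if_neg (by simp), ih]
    | none =>
      by_cases h : pvQmul s (pvCS c) = "i"
      · rw [if_pos ⟨rfl, by rw [h]⟩, ih, pvFI_cons, if_pos h]
        simp
      · rw [if_neg (by simp [h]), ih, pvFI_cons, if_neg h]
        cases pvFI (pvQmul s (pvCS c)) r with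
        | none => rfl
        | some j => simp; omega

theorem pvScan_trd (l : List Char) : ∀ (s : String) (f k : Option Int) (i : Int),
    (pvScan (some s) f k i l).2.2 =
      (match pvLK s l with
       | some j => some (i + (j : Int))
       | none => k) := by
  induction l with
  | nil => intro s f k i; rfl
  | cons c r ih =>
    intro s f k i
    simp only [pvScan, pvMul_some, pvLK_cons, ← pvCS_def]
    rw [ih]
    cases hlk : pvLK (pvQmul s (pvCS c)) r with
    | some j =>
      simp
      omega
    | none =>
      by_cases h : pvQmul s (pvCS c) = "k"
      · rw [if_pos (by rw [h]), if_pos h]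
        simp
      · rw [if_neg (by simp [h]), if_neg h]

theorem pvQprod_def (l : List Char) : pvQprod l = pvProdFrom "1" l := rfl

theorem pvLProd_nil (t : String) : pvLProd t [] = t := rfl

theorem pvLProd_cons (t : String) (c : Char) (l : List Char) :
    pvLProd t (c :: l) = pvLProd (pvQmul (pvCS c) t) l := by
  simp only [pvLProd, List.foldl_cons]

theorem pvLProd_rev {w : List Char} (hw : pvValid w) : ∀ t ∈ pvS8,
    pvLProd t w.reverse = pvQmul (pvQprod w) t := by
  induction w with
  | nil =>
    intro t ht
    rw [List.reverse_nil, pvLProd_nil, show pvQprod [] = "1" from rfl]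
    exact (pvQmul_one_mul t ht).symm
  | cons c r ih =>
    intro t ht
    have hc := pvCS_mem (hw c (by simp))
    have hr : pvValid r := fun d hd => hw d (by simp [hd])
    rw [List.reverse_cons,
      show pvLProd t (r.reverse ++ [c]) = pvQmul (pvCS c) (pvLProd t r.reverse) from by
        simp only [pvLProd, List.foldl_append, List.foldl_cons, List.foldl_nil],
      ih hr t ht, ← pvQmul_assoc _ hc _ (pvQprod_mem' hr) _ ht, ← pvQprod_cons hw]

theorem pvFK_some_iff (l : List Char) : ∀ (t : String) (j : Nat),
    pvFK t l = some j ↔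
      j < l.length ∧ pvLProd t (l.take (j+1)) = "k" ∧
        ∀ m < j, pvLProd t (l.take (m+1)) ≠ "k" := by
  induction l with
  | nil => intro t j; simp [pvFK]
  | cons c r ih =>
    intro t j
    rw [pvFK_cons]
    by_cases h : pvQmul (pvCS c) t = "k"
    · rw [if_pos h]
      constructor
      · intro hj
        injection hj with hj
        subst hj
        exact ⟨by simp, by simpa [pvLProd_cons, pvLProd_nil] using h, by omega⟩
      · rintro ⟨hlen, hP, hmin⟩
        cases j with
        | zero => rfl
        | succ j' =>
          exact absurd (by simpa [pvLProd_cons, pvLProd_nil] using h)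
            (hmin 0 (by omega))
    · rw [if_neg h]
      cases j with
      | zero =>
        constructor
        · intro hj
          cases hfk : pvFK (pvQmul (pvCS c) t) r <;> rw [hfk] at hj <;> simp at hj
        · rintro ⟨_, hP, _⟩
          exact absurd (by simpa [pvLProd_cons, pvLProd_nil] using hP) h
      | succ j' =>
        have hmap : ((pvFK (pvQmul (pvCS c) t) r).map (· + 1) = some (j' + 1)) ↔
            pvFK (pvQmul (pvCS c) t) r = some j' := by
          cases pvFK (pvQmul (pvCS c) t) r <;> simp
        rw [hmap, ih]
        constructor
        · rintro ⟨hlen, hP, hmin⟩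
          refine ⟨by simpa using Nat.succ_lt_succ hlen, by simpa [pvLProd_cons] using hP, ?_⟩
          intro m hm
          cases m with
          | zero => simpa [pvLProd_cons, pvLProd_nil] using h
          | succ m' =>
            have := hmin m' (by omega)
            simpa [pvLProd_cons] using this
        · rintro ⟨hlen, hP, hmin⟩
          refine ⟨by simpa using Nat.lt_of_succ_lt_succ hlen, by simpa [pvLProd_cons] using hP, ?_⟩
          intro m hm
          have := hmin (m+1) (by omega)
          simpa [pvLProd_cons] using this

theorem pvFK_none_iff (l : List Char) : ∀ t : String,
    pvFK t l = none ↔ ∀ m < l.length, pvLProd t (l.take (m+1)) ≠ "k" := by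
  induction l with
  | nil => intro t; simp [pvFK]
  | cons c r ih =>
    intro t
    rw [pvFK_cons]
    by_cases h : pvQmul (pvCS c) t = "k"
    · rw [if_pos h]
      constructor
      · intro hj; cases hj
      · intro hall
        exact absurd (by simpa [pvLProd_cons, pvLProd_nil] using h) (hall 0 (by simp))
    · rw [if_neg h]
      have hmap : ((pvFK (pvQmul (pvCS c) t) r).map (· + 1) = none) ↔
          pvFK (pvQmul (pvCS c) t) r = none := by
        cases pvFK (pvQmul (pvCS c) t) r <;> simp
      rw [hmap, ih]
      constructor
      · intro hall m hm
        cases m with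
        | zero => simpa [pvLProd_cons, pvLProd_nil] using h
        | succ m' =>
          have := hall m' (by simpa using Nat.lt_of_succ_lt_succ hm)
          simpa [pvLProd_cons] using this
      · intro hall m hm
        have := hall (m+1) (by simpa using Nat.succ_lt_succ hm)
        simpa [pvLProd_cons] using this

theorem pvProdFrom_take_cons (s : String) (c : Char) (r : List Char) (m : Nat) :
    pvProdFrom s ((c :: r).take (m+1)) = pvProdFrom (pvQmul s (pvCS c)) (r.take m) := by
  rw [List.take_succ_cons, pvProdFrom_cons]


theorem pvLK_some_P (l : List Char) : ∀ (s : String) (j : Nat), pvLK s l = some j →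
    j < l.length ∧ pvProdFrom s (l.take (j+1)) = "k" := by
  induction l with
  | nil => intro s j h; cases h
  | cons c r ih =>
    intro s j h
    rw [pvLK_cons] at h
    cases hlk : pvLK (pvQmul s (pvCS c)) r with
    | some j0 =>
      rw [hlk] at h
      injection h with h
      subst h
      rcases ih _ j0 hlk with ⟨h1, h2⟩
      exact ⟨by simp; omega, by rw [pvProdFrom_take_cons]; exact h2⟩
    | none =>
      rw [hlk] at h
      by_cases hk : pvQmul s (pvCS c) = "k"
      · rw [if_pos hk] at h
        injection h with h
        subst h
        exact ⟨by simp, by simpa [pvProdFrom_take_cons, pvProdFrom] using hk⟩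
      · rw [if_neg hk] at h; cases h

theorem pvLK_none_iff (l : List Char) : ∀ s : String,
    pvLK s l = none ↔ ∀ m < l.length, pvProdFrom s (l.take (m+1)) ≠ "k" := by
  induction l with
  | nil => intro s; simp [pvLK]
  | cons c r ih =>
    intro s
    rw [pvLK_cons]
    cases hlk : pvLK (pvQmul s (pvCS c)) r with
    | some j =>
      constructor
      · intro hj; cases hj
      · intro hall
        rcases pvLK_some_P r _ j hlk with ⟨hlen, hP⟩
        exact absurd (by rw [pvProdFrom_take_cons]; exact hP) (hall (j+1) (by simp; omega))
    | none =>
      by_cases h : pvQmul s (pvCS c) = "k"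
      · rw [if_pos h]
        constructor
        · intro hj; cases hj
        · intro hall
          exact absurd (by simpa [pvProdFrom_take_cons, pvProdFrom] using h) (hall 0 (by simp))
      · rw [if_neg h]
        constructor
        · intro _ m hm
          cases m with
          | zero => simpa [pvProdFrom_take_cons, pvProdFrom] using h
          | succ m' =>
            have := (ih _).mp hlk m' (by simp at hm; omega)
            rw [pvProdFrom_take_cons]
            exact this
        · intro _; rfl

theorem pvLK_some_iff (l : List Char) : ∀ (s : String) (j : Nat),
    pvLK s l = some j ↔
      j < l.length ∧ pvProdFrom s (l.take (j+1)) = "k" ∧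
        ∀ m, j < m → m < l.length → pvProdFrom s (l.take (m+1)) ≠ "k" := by
  induction l with
  | nil => intro s j; simp [pvLK]
  | cons c r ih =>
    intro s j
    rw [pvLK_cons]
    cases hlk : pvLK (pvQmul s (pvCS c)) r with
    | some j0 =>
      rcases (ih _ j0).mp hlk with ⟨h1, h2, h3⟩
      constructor
      · intro hj
        injection hj with hj
        subst hj
        refine ⟨by simp; omega, by rw [pvProdFrom_take_cons]; exact h2, ?_⟩
        intro m hm hmlen
        obtain ⟨m', rfl⟩ : ∃ m', m = m' + 1 := ⟨m - 1, by omega⟩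
        rw [pvProdFrom_take_cons]
        exact h3 m' (by omega) (by simp at hmlen; omega)
      · rintro ⟨hlen, hP, hmax⟩
        rcases Nat.lt_trichotomy j (j0 + 1) with hlt | heq | hgt
        · exact absurd (by rw [pvProdFrom_take_cons]; exact h2)
            (hmax (j0+1) (by omega) (by simp; omega))
        · rw [heq]
        · obtain ⟨j', rfl⟩ : ∃ j', j = j' + 1 := ⟨j - 1, by omega⟩
          exact absurd (by rw [pvProdFrom_take_cons] at hP; exact hP)
            (h3 j' (by omega) (by simp at hlen; omega))
    | none =>
      by_cases h : pvQmul s (pvCS c) = "k"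
      · rw [if_pos h]
        constructor
        · intro hj
          injection hj with hj
          subst hj
          refine ⟨by simp, by simpa [pvProdFrom_take_cons, pvProdFrom] using h, ?_⟩
          intro m hm hmlen
          obtain ⟨m', rfl⟩ : ∃ m', m = m' + 1 := ⟨m - 1, by omega⟩
          rw [pvProdFrom_take_cons]
          exact (pvLK_none_iff r _).mp hlk m' (by simp at hmlen; omega)
        · rintro ⟨hlen, hP, hmax⟩
          cases j with
          | zero => rfl
          | succ j' =>
            rw [pvProdFrom_take_cons] at hP
            exact absurd hP ((pvLK_none_iff r _).mp hlk j' (by simp at hlen; omega))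
      · rw [if_neg h]
        constructor
        · intro hj; cases hj
        · rintro ⟨hlen, hP, hmax⟩
          cases j with
          | zero => exact absurd (by simpa [pvProdFrom_take_cons, pvProdFrom] using hP) h
          | succ j' =>
            rw [pvProdFrom_take_cons] at hP
            exact absurd hP ((pvLK_none_iff r _).mp hlk j' (by simp at hlen; omega))

theorem pvSuff_eq {w : List Char} (hw : pvValid w) (m : Nat) (hm : m < w.length) :
    pvLProd "1" (w.reverse.take (m+1)) = pvQprod (w.drop (w.length - 1 - m)) := by
  have hd : pvValid (w.drop (w.length - (m+1))) := fun d hmem => hw d (List.mem_of_mem_drop hmem)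
  rw [List.take_reverse, pvLProd_rev hd "1" (by decide),
    pvQmul_mul_one _ (pvQprod_mem' hd), show w.length - (m+1) = w.length - 1 - m from by omega]

theorem pvPS {w : List Char} (hw : pvValid w) (htot : pvQprod w = "-1") (q : Nat) :
    pvQprod (w.drop q) = "k" ↔ pvQprod (w.take q) = "k" := by
  have ht : pvValid (w.take q) := fun d hd => hw d (List.mem_of_mem_take hd)
  have hd : pvValid (w.drop q) := fun d hd => hw d (List.mem_of_mem_drop hd)
  exact (pvQmul_cancel_k _ (pvQprod_mem' ht) _ (pvQprod_mem' hd)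
    (by rw [← pvQprod_split hw q, htot])).symm

theorem pvFindI_top {l : List Char} (hl : pvValid l) :
    pvFindI none l 0 = (pvFI "1" l).map (fun j => (j : Int)) := by
  cases l with
  | nil => rfl
  | cons c r =>
    have hc := pvCS_mem (hl c (by simp))
    simp only [pvFindI, pvFI_cons, ← pvCS_def, pvQmul_one_mul _ hc]
    rw [show pvMul none (some (pvCS c)) = some (pvCS c) from rfl]
    by_cases h : pvCS c = "i"
    · rw [if_pos (by rw [h]), if_pos h]
      rfl
    · rw [if_neg (by simp [h]), if_neg h, pvFindI_spec]
      cases pvFI (pvCS c) r with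
      | none => rfl
      | some j => simp; omega

theorem pvFindK_top {l : List Char} (hl : pvValid l) (len : Int) :
    pvFindK none l 0 len = (pvFK "1" l).map (fun j => len - (j : Int) - 1) := by
  cases l with
  | nil => rfl
  | cons c r =>
    have hc := pvCS_mem (hl c (by simp))
    simp only [pvFindK, pvFK_cons, ← pvCS_def, pvQmul_mul_one _ hc]
    rw [show pvMul (some (pvCS c)) none = some (pvCS c) from rfl]
    by_cases h : pvCS c = "k"
    · rw [if_pos (by rw [h]), if_pos h]
      simp
    · rw [if_neg (by simp [h]), if_neg h, pvFindK_spec]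
      cases pvFK (pvCS c) r with
      | none => rfl
      | some j => simp; omega

theorem pvScan_top {l : List Char} (hl : pvValid l) :
    (pvScan none none none 0 l).2.1 = (pvFI "1" l).map (fun j => (j : Int)) ∧
    (pvScan none none none 0 l).2.2 = (pvLK "1" l).map (fun j => (j : Int)) := by
  cases l with
  | nil => exact ⟨rfl, rfl⟩
  | cons c r =>
    have hc := pvCS_mem (hl c (by simp))
    simp only [pvScan, pvFI_cons, pvLK_cons, ← pvCS_def, pvQmul_one_mul _ hc,
      show pvMul none (some (pvCS c)) = some (pvCS c) from rfl]
    constructor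
    · rw [pvScan_snd]
      by_cases h : pvCS c = "i"
      · rw [if_pos ⟨trivial, by rw [h]⟩, if_pos h]
        rfl
      · rw [if_neg (by simp [h]), if_neg h]
        cases pvFI (pvCS c) r with
        | none => rfl
        | some j => simp; omega
    · rw [pvScan_trd]
      cases hlk : pvLK (pvCS c) r with
      | some j => simp; omega
      | none =>
        by_cases h : pvCS c = "k"
        · rw [if_pos (by rw [h]), if_pos h]
          rfl
        · rw [if_neg (by simp [h]), if_neg h]
          rfl

theorem pvK_bridge {w : List Char} (hw : pvValid w) (htot : pvQprod w = "-1") :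
    pvFindK none w.reverse 0 (w.length : Int) = (pvLK "1" w).map (fun j => (j : Int) + 1) := by
  have hwrev : pvValid w.reverse := fun d hd => hw d (List.mem_reverse.mp hd)
  have hlen1 : 1 ≤ w.length := by
    cases w with
    | nil => exact absurd htot (by decide)
    | cons c r => simp
  rw [pvFindK_top hwrev]
  cases hlk : pvLK "1" w with
  | none =>
    have hLK := (pvLK_none_iff w "1").mp hlk
    rw [show pvFK "1" w.reverse = none from by
      rw [pvFK_none_iff]
      intro m hm hk
      rw [List.length_reverse] at hm
      rw [pvSuff_eq hw m hm] at hk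
      have hpre := (pvPS hw htot (w.length - 1 - m)).mp hk
      rcases Nat.eq_zero_or_pos (w.length - 1 - m) with hq0 | hqp
      · rw [hq0, List.take_zero] at hpre
        exact absurd hpre (by decide)
      · obtain ⟨q', hq'⟩ : ∃ q', w.length - 1 - m = q' + 1 := ⟨w.length - 2 - m, by omega⟩
        rw [hq'] at hpre
        exact hLK q' (by omega) hpre]
    rfl
  | some j =>
    rcases (pvLK_some_iff w "1" j).mp hlk with ⟨hjlen, hPj, hmax⟩
    have hj2 : j + 1 < w.length := by
      by_contra hle
      have hje : j + 1 = w.length := by omega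
      rw [show w.take (j+1) = w from by rw [hje]; exact List.take_length,
        ← pvQprod_def, htot] at hPj
      exact absurd hPj (by decide)
    rw [show pvFK "1" w.reverse = some (w.length - j - 2) from by
      rw [pvFK_some_iff]
      refine ⟨by rw [List.length_reverse]; omega, ?_, ?_⟩
      · rw [pvSuff_eq hw _ (by omega : w.length - j - 2 < w.length),
          show w.length - 1 - (w.length - j - 2) = j + 1 from by omega]
        exact (pvPS hw htot (j+1)).mpr hPj
      · intro m hm hk
        rw [pvSuff_eq hw m (by omega)] at hk
        have hpre := (pvPS hw htot (w.length - 1 - m)).mp hk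
        obtain ⟨q', hq'⟩ : ∃ q', w.length - 1 - m = q' + 1 := ⟨w.length - 2 - m, by omega⟩
        rw [hq'] at hpre
        exact hmax q' (by omega) (by omega) hpre]
    show some ((w.length : Int) - ((w.length - j - 2 : Nat) : Int) - 1) = some ((j : Int) + 1)
    simp only [Option.some.injEq]
    omega

theorem pvBody_eq {w : List Char} (hw : pvValid w) : pvBodyA w = pvBodyB w := by
  cases w with
  | nil => rfl
  | cons c r =>
    have hc : pvValidChar c := hw c (by simp)
    have hsall := pvFoldA_none hc r
    simp only [pvBodyA, pvBodyB]
    rcases hscan : pvScan none none none 0 (c :: r) with ⟨sc, ifst, klst⟩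
    have hsc : sc = some (pvQprod (c :: r)) := by
      have := pvScan_fst (c :: r) none none none 0
      rw [hscan] at this
      rw [← hsall, ← this]
    rw [hsall, hsc]
    by_cases htot : pvQprod (c :: r) = "-1"
    · rw [htot, if_neg (by simp), if_neg (by simp)]
      have hifst : ifst = (pvFI "1" (c :: r)).map (fun j => (j : Int)) := by
        have := (pvScan_top hw).1
        rw [hscan] at this
        exact this
      have hklst : klst = (pvLK "1" (c :: r)).map (fun j => (j : Int)) := by
        have := (pvScan_top hw).2
        rw [hscan] at this
        exact this
      rw [pvFindI_top hw, pvK_bridge hw htot, hifst, hklst]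
      cases pvFI "1" (c :: r) with
      | none => cases pvLK "1" (c :: r) <;> rfl
      | some p =>
        cases pvLK "1" (c :: r) with
        | none => rfl
        | some j =>
          show (if ((j : Int) + 1) ≤ (p : Int) then "NO" else "YES")
             = (if ((j : Int) + 1) > (p : Int) then "YES" else "NO")
          by_cases hcmp : ((j : Int) + 1) ≤ (p : Int)
          · rw [if_pos hcmp, if_neg (by omega)]
          · rw [if_neg hcmp, if_pos (by omega)]
    · rw [if_pos (by simp [htot]), if_pos (by simp [htot])]

theorem pvBody_short {w : List Char} (hlen : w.length ≤ 1) : pvBodyA w = pvBodyB w := by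
  match w with
  | [] => rfl
  | [c] =>
    have hne : String.ofList [c] ≠ "-1" := by
      intro h
      have := congrArg String.toList h
      simp at this
    have h0 : pvMul none (some (String.ofList [c])) = some (String.ofList [c]) := rfl
    simp only [pvBodyA, pvBodyB, pvScan, List.foldl_cons, List.foldl_nil, h0]
    rw [if_pos (by simpa using hne), if_pos (by simpa using hne)]
  | c1 :: c2 :: rest =>
    exact absurd hlen (by simp)

-- ===== VERDICT (by name: the statement is the Claim_ definition above) =====
theorem do_case_spec : Claim_equal_do_case := by
  intro x word _ hpre
  unfold Spec_do_case do_case do_case_alt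
  rcases hpre with hshort | hvalid
  · apply pvBody_short
    show (List.replicate (min x (PySem.Int.mod x 4 + 12)).toNat word.toList).flatten.length ≤ 1
    simpa [List.length_flatten] using hshort
  · apply pvBody_eq
    intro d hd
    have hd' : d ∈ word.toList := by
      simp only [PySem.List.pyRepeat, List.mem_flatten, List.mem_replicate] at hd
      obtain ⟨l, ⟨_, rfl⟩, hdl⟩ := hd
      exact hdl
    have hall := List.all_eq_true.mp hvalid d hd'
    simp only [Bool.or_eq_true, beq_iff_eq] at hall
    simp only [pvValidChar, List.mem_cons, List.not_mem_nil, or_false]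
    tauto
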